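-- pv_equiv track=rewrite | github.com/SentinelOps-CI/provability-fabric | tests/redteam/abac_fuzz.py | determine_expected_labels
-- ===== SOURCE A (Python) =====
-- from typing import Dict, List, Tuple, Optional
--
-- def determine_expected_labels(
--     roles: List[str], requested_label: str
-- ) -> List[str]:
--     """Determine expected accessible labels based on roles"""
--     accessible_labels = ["public"]  # Public is always accessible
--
--     if "admin" in roles:
--         accessible_labels.extend(["private", "confidential", "internal"])
--     elif "manager" in roles:
--         accessible_labels.extend(["private", "internal"])
--     elif "analyst" in roles:
--         accessible_labels.extend(["private"])
--     elif "finance" in roles and requested_label == "financial":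
--         accessible_labels.append("financial")
--     elif "hr" in roles and requested_label == "pii":
--         accessible_labels.append("pii")
--     elif "security" in roles:
--         accessible_labels.extend(["confidential", "sensitive"])
--
--     # Only return labels that were actually requested
--     return [label for label in accessible_labels if label == requested_label]
-- ===== SOURCE B (Python) =====
-- # Priority-based re-implementation: one pass over the input roles collecting
-- # numeric priorities (conditioned for finance/hr), take the MIN priority,
-- # then look the granted labels up in a table (objective: alternative).
-- PRIORITY = {"admin": 0, "manager": 1, "analyst": 2, "finance": 3, "hr": 4, "security": 5}
-- GRANTS = [
--     ["private", "confidential", "internal"],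
--     ["private", "internal"],
--     ["private"],
--     ["financial"],
--     ["pii"],
--     ["confidential", "sensitive"],
-- ]
--
-- def _prio(role, requested_label):
--     p = PRIORITY.get(role)
--     if p == 3 and requested_label != "financial":
--         return None
--     if p == 4 and requested_label != "pii":
--         return None
--     return p
--
-- def determine_expected_labels(roles, requested_label):
--     prios = [p for p in (_prio(r, requested_label) for r in roles) if p is not None]
--     best = min(prios, default=None)
--     accessible = ["public"] + (GRANTS[best] if best is not None else [])
--     return [requested_label] if requested_label in accessible else []
-- ===== Notes on version B (the rewrite author's own statement) =====
-- stated objective: alternative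
-- what changed: Instead of A's if/elif chain of six role-membership tests over a growing accessible list, B makes one pass over the input roles mapping each to a numeric priority (finance/hr conditioned on the requested label), takes the minimum priority, and looks the granted labels up in a table; the minimum priority coincides with the first elif branch that fires.
import Mathlib
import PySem

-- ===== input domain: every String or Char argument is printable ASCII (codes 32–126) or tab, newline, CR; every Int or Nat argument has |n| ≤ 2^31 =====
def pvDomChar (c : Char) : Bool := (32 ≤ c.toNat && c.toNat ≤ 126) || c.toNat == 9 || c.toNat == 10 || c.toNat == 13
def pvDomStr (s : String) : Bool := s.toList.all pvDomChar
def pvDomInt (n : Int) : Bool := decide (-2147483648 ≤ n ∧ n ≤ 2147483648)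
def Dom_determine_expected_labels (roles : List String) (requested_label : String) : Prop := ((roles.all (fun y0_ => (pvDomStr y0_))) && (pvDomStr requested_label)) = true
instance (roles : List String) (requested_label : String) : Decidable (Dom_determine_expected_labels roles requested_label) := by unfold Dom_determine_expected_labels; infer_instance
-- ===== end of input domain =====

-- B replaces A's if/elif chain by one pass over the input roles collecting numeric
-- priorities, a MIN over them, and a grants-table lookup (objective: alternative).


-- ===== PORT A =====
def determine_expected_labels (roles : List String) (requested_label : String) : List String :=
  let accessible_labels : List String := ["public"]
  let accessible_labels :=
    if roles.contains "admin" then accessible_labels ++ ["private", "confidential", "internal"]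
    else if roles.contains "manager" then accessible_labels ++ ["private", "internal"]
    else if roles.contains "analyst" then accessible_labels ++ ["private"]
    else if roles.contains "finance" && (requested_label == "financial") then accessible_labels ++ ["financial"]
    else if roles.contains "hr" && (requested_label == "pii") then accessible_labels ++ ["pii"]
    else if roles.contains "security" then accessible_labels ++ ["confidential", "sensitive"]
    else accessible_labels
  accessible_labels.filter (fun label => label == requested_label)

-- ===== PORT B =====
def pvPriority : PySem.Dict String Nat :=
  PySem.Dict.ofList [("admin", 0), ("manager", 1), ("analyst", 2), ("finance", 3), ("hr", 4), ("security", 5)]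

def pvGrants : List (List String) :=
  [["private", "confidential", "internal"],
   ["private", "internal"],
   ["private"],
   ["financial"],
   ["pii"],
   ["confidential", "sensitive"]]

-- _prio(role, requested_label)
def pvPrio (requested_label role : String) : Option Nat :=
  let p := PySem.Dict.get? pvPriority role
  if p == some 3 && !(requested_label == "financial") then none
  else if p == some 4 && !(requested_label == "pii") then none
  else p

def determine_expected_labels_alt (roles : List String) (requested_label : String) : List String :=
  let prios := roles.filterMap (pvPrio requested_label)
  let best := PySem.List.min? prios (fun x => x)   -- min(prios, default=None)
  -- GRANTS[best]: best is always a valid index 0..5, so getD is exact here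
  let accessible := ["public"] ++ (match best with | some b => pvGrants.getD b [] | none => [])
  if accessible.contains requested_label then [requested_label] else []

-- ===== PRECONDITION & SPEC =====
def Spec_determine_expected_labels (roles : List String) (requested_label : String) (out : List String) : Prop := out = determine_expected_labels_alt roles requested_label
instance (roles : List String) (requested_label : String) (out : List String) : Decidable (Spec_determine_expected_labels roles requested_label out) := by unfold Spec_determine_expected_labels; infer_instance

-- ===== CLAIM (what is proved, stated in full; the proofs are below) =====
def Claim_equal_determine_expected_labels : Prop := ∀ (roles : List String) (requested_label : String), Dom_determine_expected_labels roles requested_label → Spec_determine_expected_labels roles requested_label (determine_expected_labels roles requested_label)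

-- ===== LEMMAS AND PROOFS =====


-- pvPriority reduced to its literal association list
theorem pvPriority_eq : pvPriority = PySem.Dict.mk [("admin", 0), ("manager", 1), ("analyst", 2), ("finance", 3), ("hr", 4), ("security", 5)] := by decide

theorem prio_admin (rl : String) : pvPrio rl "admin" = some 0 := rfl
theorem prio_manager (rl : String) : pvPrio rl "manager" = some 1 := rfl
theorem prio_analyst (rl : String) : pvPrio rl "analyst" = some 2 := rfl
theorem prio_security (rl : String) : pvPrio rl "security" = some 5 := rfl
theorem prio_finance (rl : String) : pvPrio rl "finance" = if rl == "financial" then some 3 else none := by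
  by_cases h : rl = "financial" <;> simp [pvPrio, pvPriority_eq, h, PySem.Dict.get?_mk_cons]
theorem prio_hr (rl : String) : pvPrio rl "hr" = if rl == "pii" then some 4 else none := by
  by_cases h : rl = "pii" <;> simp [pvPrio, pvPriority_eq, h, PySem.Dict.get?_mk_cons]
theorem prio_other (rl r : String) (h1 : ¬ r = "admin") (h2 : ¬ r = "manager") (h3 : ¬ r = "analyst")
    (h4 : ¬ r = "finance") (h5 : ¬ r = "hr") (h6 : ¬ r = "security") : pvPrio rl r = none := by
  simp [pvPrio, pvPriority_eq, Ne.symm h1, Ne.symm h2, Ne.symm h3,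
    Ne.symm h4, Ne.symm h5, Ne.symm h6, PySem.Dict.get?]

-- foldl min expressed through min?
theorem foldl_min_eq (t : List Nat) (x : Nat) :
    t.foldl min x = (PySem.List.min? t (fun y => y)).elim x (min x) := by
  induction t generalizing x with
  | nil =>
    have : PySem.List.min? ([] : List Nat) (fun y => y) = none := by
      rw [PySem.List.min?_eq_none_iff]
    simp [this]
  | cons a t ih =>
    rw [PySem.List.min?_id_cons]
    simp only [List.foldl_cons, Option.elim_some]
    rw [ih (min x a), ih a]
    cases h : PySem.List.min? t (fun y => y) with
    | none => simp
    | some m => simp [Nat.min_assoc]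

theorem min?_id_cons' (x : Nat) (t : List Nat) :
    PySem.List.min? (x :: t) (fun y => y) =
      some ((PySem.List.min? t (fun y => y)).elim x (min x)) := by
  rw [PySem.List.min?_id_cons, foldl_min_eq]

-- the min of the collected priorities equals the first-firing-branch index of A's chain
theorem best_chain (rl : String) (roles : List String) :
    PySem.List.min? (roles.filterMap (pvPrio rl)) (fun x => x) =
      (if roles.contains "admin" then some 0
       else if roles.contains "manager" then some 1
       else if roles.contains "analyst" then some 2
       else if roles.contains "finance" && rl == "financial" then some 3
       else if roles.contains "hr" && rl == "pii" then some 4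
       else if roles.contains "security" then some 5
       else none) := by
  induction roles with
  | nil =>
    have : PySem.List.min? ([] : List Nat) (fun y => y) = none := by
      rw [PySem.List.min?_eq_none_iff]
    simp [this]
  | cons r rest ih =>
    by_cases h1 : r = "admin"
    · subst h1
      simp [prio_admin, min?_id_cons', ih]
      split_ifs <;> simp_all
    by_cases h2 : r = "manager"
    · subst h2
      simp [prio_manager, min?_id_cons', ih]
      split_ifs <;> simp_all
    by_cases h3 : r = "analyst"
    · subst h3
      simp [prio_analyst, min?_id_cons', ih]
      split_ifs <;> simp_all
    by_cases h4 : r = "finance"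
    · subst h4
      by_cases hf : rl = "financial" <;>
        simp [prio_finance, min?_id_cons', ih, hf] <;>
        split_ifs <;> simp_all <;> split_ifs <;> simp_all
    by_cases h5 : r = "hr"
    · subst h5
      by_cases hp : rl = "pii" <;>
        simp [prio_hr, min?_id_cons', ih, hp] <;>
        split_ifs <;> simp_all <;> split_ifs <;> simp_all
    by_cases h6 : r = "security"
    · subst h6
      simp [prio_security, min?_id_cons', ih]
      split_ifs <;> simp_all
    · simp [prio_other rl r h1 h2 h3 h4 h5 h6, ih, Ne.symm h1, Ne.symm h2, Ne.symm h3,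
        Ne.symm h4, Ne.symm h5, Ne.symm h6]

-- filtering a duplicate-free list for elements equal to r yields [r] or []
theorem filter_eq_nodup (l : List String) (r : String) (h : l.Nodup) :
    l.filter (fun x => x == r) = if l.contains r then [r] else [] := by
  induction l with
  | nil => simp
  | cons a t ih =>
    rcases List.nodup_cons.mp h with ⟨ha, ht⟩
    by_cases hr : a = r
    · subst hr
      have : t.filter (fun x => x == a) = [] := by
        simp only [List.filter_eq_nil_iff, beq_iff_eq]
        intro x hx hxe; exact ha (hxe ▸ hx)
      simp [this]
    · have hr' : ¬ r = a := fun h' => hr h'.symm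
      simp [hr, ih ht, hr']

-- ===== VERDICT (by name: the statement is the Claim_ definition above) =====
theorem determine_expected_labels_spec : Claim_equal_determine_expected_labels := by
  intro roles r _
  unfold Spec_determine_expected_labels determine_expected_labels determine_expected_labels_alt
  simp only [best_chain]
  split_ifs <;>
    (rw [filter_eq_nodup _ _ (by decide)]; simp_all [pvGrants])
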